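-- pv_equiv track=rewrite | github.com/BurhanK2003/Video-Editor-Project | video-auto-editor/src/auto_video_editor/planner.py | _context_entities_for_chunk
-- ===== SOURCE A (Python) =====
-- def _singularize_token(token: str) -> str:
--     t = (token or "").strip().lower()
--     if len(t) > 4 and t.endswith("ies"):
--         return t[:-3] + "y"
--     if len(t) > 3 and t.endswith("s") and not t.endswith("ss"):
--         return t[:-1]
--     return t
--
-- def _context_entities_for_chunk(text: str, story_context: dict | None) -> list[str]:
--     if not story_context:
--         return []
--     entities = story_context.get("key_entities")
--     if not isinstance(entities, list):
--         return []
--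
--     lowered = text.lower()
--     matched: list[str] = []
--     for entity in entities:
--         candidate = str(entity or "").strip().lower()
--         if not candidate:
--             continue
--         singular = _singularize_token(candidate)
--         plural = candidate if candidate.endswith("s") else candidate + "s"
--         if candidate in lowered or singular in lowered or plural in lowered:
--             matched.append(candidate)
--
--     if matched:
--         return matched[:3]
--     return [str(e).strip().lower() for e in entities[:2] if str(e).strip()]
-- ===== SOURCE B (Python) =====
-- def _singularize_token(token: str) -> str:
--     t = (token or "").strip().lower()
--     if len(t) > 4 and t.endswith("ies"):
--         return t[:-3] + "y"
--     if len(t) > 3 and t.endswith("s") and not t.endswith("ss"):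
--         return t[:-1]
--     return t
--
--
-- def _context_entities_for_chunk(text: str, story_context: dict | None) -> list[str]:
--     if not story_context:
--         return []
--     entities = story_context.get("key_entities")
--     if not isinstance(entities, list):
--         return []
--
--     lowered = text.lower()
--
--     # Pass 1: normalise entities once, collecting (candidate, singular) pairs and
--     # the set of needle lengths.  The plural form never needs checking: if
--     # candidate + "s" occurs in the text then candidate itself already does.
--     cands = []
--     lengths = set()
--     for entity in entities:
--         c = str(entity or "").strip().lower()
--         if c:
--             s = _singularize_token(c)
--             cands.append((c, s))
--             lengths.add(len(c))
--             lengths.add(len(s))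
--
--     # Pass 2: index the text once per distinct needle length, instead of one
--     # substring scan per entity variant.
--     window_index = set()
--     n = len(lowered)
--     for L in lengths:
--         for i in range(n - L + 1):
--             window_index.add(lowered[i:i + L])
--
--     matched = [c for c, s in cands if c in window_index or s in window_index]
--
--     if matched:
--         return matched[:3]
--     return [str(e).strip().lower() for e in entities[:2] if str(e).strip()]
-- ===== Notes on version B (the rewrite author's own statement) =====
-- stated objective: alternative
-- what changed: Instead of one substring scan of the text per entity variant (plus a redundant plural check, which is subsumed by the candidate check), B normalises entities in one pass, builds a set index of all text windows once per distinct needle length, and answers every membership query by set lookup; it trades per-variant text scans for per-distinct-length indexing passes.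
import Mathlib
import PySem

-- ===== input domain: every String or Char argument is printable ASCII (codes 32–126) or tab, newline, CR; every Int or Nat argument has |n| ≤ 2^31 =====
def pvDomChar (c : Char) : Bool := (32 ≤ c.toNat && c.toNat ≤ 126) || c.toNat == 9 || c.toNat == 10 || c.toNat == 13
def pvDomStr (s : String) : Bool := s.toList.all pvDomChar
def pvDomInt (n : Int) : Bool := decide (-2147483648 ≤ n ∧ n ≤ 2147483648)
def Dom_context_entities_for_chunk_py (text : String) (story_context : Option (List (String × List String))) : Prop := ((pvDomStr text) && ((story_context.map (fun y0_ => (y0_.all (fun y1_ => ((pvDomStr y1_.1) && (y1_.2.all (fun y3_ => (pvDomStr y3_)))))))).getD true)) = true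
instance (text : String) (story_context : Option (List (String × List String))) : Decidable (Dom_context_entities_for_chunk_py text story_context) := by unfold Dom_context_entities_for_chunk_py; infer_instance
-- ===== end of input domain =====

-- B replaces A's per-entity substring scans by a window index of the text built once per
-- distinct needle length, and drops A's plural check (subsumed by the candidate check).

-- str(x or "").strip().lower() — the normalisation expression both Pythons contain
def pvCandidate (entity : String) : String :=
  PySem.Str.lower (PySem.Str.strip (if entity = "" then "" else entity))

-- port of _singularize_token (module helper used by both A and B)
def pvSingularize (token : String) : String :=
  let t := PySem.Str.lower (PySem.Str.strip (if token = "" then "" else token))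
  if decide (4 < PySem.Str.len t) && PySem.Str.endswith t "ies" then
    PySem.Str.slice t none (some (-3)) ++ "y"
  else if decide (3 < PySem.Str.len t) && PySem.Str.endswith t "s" && !(PySem.Str.endswith t "ss") then
    PySem.Str.slice t none (some (-1))
  else t

-- ===== PORT A =====
def context_entities_for_chunk_py (text : String) (story_context : Option (List (String × List String))) : List String :=
  match story_context with
  | none => []
  | some ctx =>
    if ctx.isEmpty then []
    else
      match (PySem.Dict.mk ctx).get? "key_entities" with
      | none => []
      | some entities =>
        let lowered := PySem.Str.lower text
        let matched := entities.foldl (fun matched entity =>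
          let candidate := pvCandidate entity
          if candidate = "" then matched
          else
            let singular := pvSingularize candidate
            let plural := if PySem.Str.endswith candidate "s" then candidate else candidate ++ "s"
            if PySem.Str.isIn candidate lowered || PySem.Str.isIn singular lowered ||
                PySem.Str.isIn plural lowered then
              matched ++ [candidate]
            else matched) []
        if !matched.isEmpty then matched.take 3
        else (entities.take 2).foldl (fun acc e =>
          if PySem.Str.strip e = "" then acc
          else acc ++ [PySem.Str.lower (PySem.Str.strip e)]) []

-- ===== PORT B =====
def context_entities_for_chunk_py_alt (text : String) (story_context : Option (List (String × List String))) : List String :=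
  match story_context with
  | none => []
  | some ctx =>
    if ctx.isEmpty then []
    else
      match (PySem.Dict.mk ctx).get? "key_entities" with
      | none => []
      | some entities =>
        let lowered := PySem.Str.lower text
        -- pass 1: (candidate, singular) pairs plus the set of needle lengths
        let st := entities.foldl (fun (st : List (String × String) × PySem.Set Int) entity =>
          let c := pvCandidate entity
          if c = "" then st
          else
            let s := pvSingularize c
            (st.1 ++ [(c, s)],
             PySem.Set.add (PySem.Set.add st.2 (PySem.Str.len c)) (PySem.Str.len s)))
          ([], PySem.Set.empty)
        -- pass 2: index the text once per distinct needle length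
        let n := PySem.Str.len lowered
        let windowIndex := st.2.foldl (fun idx L =>
          (PySem.List.pyRange 0 (n - L + 1)).foldl (fun idx i =>
            PySem.Set.add idx (PySem.Str.slice lowered (some i) (some (i + L)))) idx)
          PySem.Set.empty
        let matched := st.1.filterMap (fun p =>
          if PySem.Set.contains windowIndex p.1 || PySem.Set.contains windowIndex p.2 then
            some p.1
          else none)
        if !matched.isEmpty then matched.take 3
        else (entities.take 2).filterMap (fun e =>
          if PySem.Str.strip e = "" then none
          else some (PySem.Str.lower (PySem.Str.strip e)))

-- ===== PRECONDITION & SPEC =====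
def Spec_context_entities_for_chunk_py (text : String) (story_context : Option (List (String × List String))) (out : List String) : Prop := out = context_entities_for_chunk_py_alt text story_context
instance (text : String) (story_context : Option (List (String × List String))) (out : List String) : Decidable (Spec_context_entities_for_chunk_py text story_context out) := by unfold Spec_context_entities_for_chunk_py; infer_instance

-- ===== CLAIM (what is proved, stated in full; the proofs are below) =====
def Claim_equal_context_entities_for_chunk_py : Prop := ∀ (text : String) (story_context : Option (List (String × List String))), Dom_context_entities_for_chunk_py text story_context → Spec_context_entities_for_chunk_py text story_context (context_entities_for_chunk_py text story_context)

-- ===== LEMMAS AND PROOFS =====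

-- generic: membership in a fold of set-inserts
lemma pv_mem_foldl_add_iff {α β : Type} [BEq α] [LawfulBEq α] (f : β → α) (l : List β)
    (S : PySem.Set α) (x : α) :
    x ∈ l.foldl (fun a b => PySem.Set.add a (f b)) S ↔ x ∈ S ∨ ∃ b ∈ l, x = f b := by
  induction l generalizing S with
  | nil => simp
  | cons hd tl ih =>
      simp only [List.foldl_cons, ih, PySem.Set.mem_add, List.mem_cons]
      aesop

-- nested version, for the window index double loop
lemma pv_mem_foldl_foldl_add_iff {α β γ : Type} [BEq α] [LawfulBEq α] (g : β → List γ)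
    (f : β → γ → α) (l : List β) (S : PySem.Set α) (x : α) :
    x ∈ l.foldl (fun a b => (g b).foldl (fun a' c => PySem.Set.add a' (f b c)) a) S ↔
      x ∈ S ∨ ∃ b ∈ l, ∃ c ∈ g b, x = f b c := by
  induction l generalizing S with
  | nil => simp
  | cons hd tl ih =>
      simp only [List.foldl_cons, ih, pv_mem_foldl_add_iff, List.mem_cons]
      aesop

-- membership in the needle-length set built by B's first pass
lemma pv_mem_lenfold_iff (l : List String) (S : PySem.Set Int) (x : Int) :
    x ∈ l.foldl (fun S e => if pvCandidate e = "" then S else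
        PySem.Set.add (PySem.Set.add S (PySem.Str.len (pvCandidate e)))
          (PySem.Str.len (pvSingularize (pvCandidate e)))) S ↔
      x ∈ S ∨ ∃ e ∈ l, pvCandidate e ≠ "" ∧
        (x = PySem.Str.len (pvCandidate e) ∨ x = PySem.Str.len (pvSingularize (pvCandidate e))) := by
  induction l generalizing S with
  | nil =>
      rw [List.foldl_nil]
      simp only [List.not_mem_nil, false_and, exists_false, or_false]
  | cons hd tl ih =>
      by_cases h : pvCandidate hd = ""
      · rw [List.foldl_cons, if_pos h, ih]
        simp only [List.mem_cons]
        constructor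
        · rintro (hS | ⟨e, he, hne, hx⟩)
          · exact Or.inl hS
          · exact Or.inr ⟨e, Or.inr he, hne, hx⟩
        · rintro (hS | ⟨e, (rfl | he), hne, hx⟩)
          · exact Or.inl hS
          · exact absurd h hne
          · exact Or.inr ⟨e, he, hne, hx⟩
      · rw [List.foldl_cons, if_neg h, ih]
        simp only [PySem.Set.mem_add, List.mem_cons]
        constructor
        · rintro (((hS | hx) | hx) | ⟨e, he, hne, hx⟩)
          · exact Or.inl hS
          · exact Or.inr ⟨hd, Or.inl rfl, h, Or.inl hx⟩
          · exact Or.inr ⟨hd, Or.inl rfl, h, Or.inr hx⟩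
          · exact Or.inr ⟨e, Or.inr he, hne, hx⟩
        · rintro (hS | ⟨e, (rfl | he), hne, (hx | hx)⟩)
          · exact Or.inl (Or.inl (Or.inl hS))
          · exact Or.inl (Or.inl (Or.inr hx))
          · exact Or.inl (Or.inr hx)
          · exact Or.inr ⟨e, he, hne, Or.inl hx⟩
          · exact Or.inr ⟨e, he, hne, Or.inr hx⟩

-- 'c + "s" in t' implies 'c in t'
lemma pv_isIn_append_s (c lw : String) (h : PySem.Str.isIn (c ++ "s") lw = true) :
    PySem.Str.isIn c lw = true := by
  rw [PySem.Str.isIn_iff_infix] at h ⊢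
  refine List.IsInfix.trans ?_ h
  rw [String.toList_append]
  exact (List.prefix_append _ _).isInfix

-- A's plural disjunct is subsumed by the candidate disjunct
lemma pv_cond_plural (c s lw : String) :
    (PySem.Str.isIn c lw || PySem.Str.isIn s lw ||
      PySem.Str.isIn (if PySem.Str.endswith c "s" then c else c ++ "s") lw)
    = (PySem.Str.isIn c lw || PySem.Str.isIn s lw) := by
  split_ifs with h
  · cases hc : PySem.Chars.isIn c.toList lw.toList <;> simp [hc]
  · by_cases hp : PySem.Str.isIn (c ++ "s") lw = true
    · have hc : PySem.Chars.isIn c.toList lw.toList = true := by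
        simpa using pv_isIn_append_s c lw hp
      simp [hc]
    · simp only [Bool.not_eq_true] at hp
      have hp' : PySem.Chars.isIn (c.toList ++ ['s']) lw.toList = false := by simpa using hp
      simp [hp']

-- every window slice is a substring of the text
lemma pv_slice_isIn (lw : String) (i L : Int) (hi : 0 ≤ i) (hL : 0 ≤ L) :
    PySem.Str.isIn (PySem.Str.slice lw (some i) (some (i + L))) lw = true := by
  rw [PySem.Str.isIn_iff_infix]
  have ht : (PySem.Str.slice lw (some i) (some (i + L))).toList
      = PySem.List.slice lw.toList (some i) (some (i + L)) := by simp [PySem.Str.slice]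
  rw [ht, PySem.List.slice_toNat _ hi (by omega)]
  exact (List.take_prefix _ _).isInfix.trans (List.drop_suffix _ _).isInfix

-- every substring of the text is a window slice at some admissible offset
lemma pv_isIn_window (lw x : String) (h : PySem.Str.isIn x lw = true) :
    ∃ i : Int, 0 ≤ i ∧ i < PySem.Str.len lw - PySem.Str.len x + 1 ∧
      x = PySem.Str.slice lw (some i) (some (i + PySem.Str.len x)) := by
  rw [PySem.Str.isIn_iff_infix] at h
  obtain ⟨u, v, huv⟩ := h
  have hlen : lw.toList.length = u.length + x.toList.length + v.length := by
    rw [← huv]; simp; omega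
  refine ⟨(u.length : Int), Int.natCast_nonneg _, ?_, ?_⟩
  · rw [PySem.Str.len_eq, PySem.Str.len_eq]; omega
  · apply (String.toList_inj).mp
    have ht : (PySem.Str.slice lw (some (u.length : Int))
          (some ((u.length : Int) + PySem.Str.len x))).toList
        = PySem.List.slice lw.toList (some (u.length : Int)) (some ((u.length : Int) + PySem.Str.len x)) := by
      simp [PySem.Str.slice]
    have hb0 : (0 : Int) ≤ (u.length : Int) + PySem.Str.len x := by
      rw [PySem.Str.len_eq]; positivity
    rw [ht, PySem.List.slice_toNat _ (Int.natCast_nonneg _) hb0]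
    have h1 : (((u.length : Int)) + PySem.Str.len x).toNat - ((u.length : Int)).toNat
        = x.toList.length := by rw [PySem.Str.len_eq]; omega
    rw [h1]
    have h2 : ((u.length : Int)).toNat = u.length := by omega
    rw [h2, ← huv, List.append_assoc, List.drop_left, List.take_left]

-- foldl-with-append = filterMap
lemma pv_foldl_if_append {α β : Type} (p : α → Bool) (f : α → β) (l : List α) (acc : List β) :
    l.foldl (fun m e => if p e then m else m ++ [f e]) acc
      = acc ++ l.filterMap (fun e => if p e then none else some (f e)) := by
  induction l generalizing acc with
  | nil => simp
  | cons hd tl ih => by_cases h : p hd <;> simp [h, ih]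

-- the fallback comprehension
lemma pv_fallback_eq (l : List String) :
    List.foldl (fun acc e => if PySem.Str.strip e = "" then acc
        else acc ++ [PySem.Str.lower (PySem.Str.strip e)]) [] l
    = List.filterMap (fun e => if PySem.Str.strip e = "" then none
        else some (PySem.Str.lower (PySem.Str.strip e))) l := by
  have hfun : (fun (acc : List String) (e : String) => if PySem.Str.strip e = "" then acc
      else acc ++ [PySem.Str.lower (PySem.Str.strip e)])
      = (fun acc e => if (PySem.Str.strip e == "") then acc
      else acc ++ [(fun e => PySem.Str.lower (PySem.Str.strip e)) e]) := by
    funext acc e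
    by_cases h : PySem.Str.strip e = "" <;> simp [h]
  rw [hfun, pv_foldl_if_append]
  simp only [List.nil_append]
  apply List.filterMap_congr
  intro e _
  by_cases h : PySem.Str.strip e = "" <;> simp [h]


-- B's pair fold splits into its two component folds
lemma pv_pairfold (l : List String) (m0 : List (String × String)) (S0 : PySem.Set Int) :
    List.foldl (fun (st : List (String × String) × PySem.Set Int) entity =>
        if pvCandidate entity = "" then st
        else (st.1 ++ [(pvCandidate entity, pvSingularize (pvCandidate entity))],
          (st.2.add (PySem.Str.len (pvCandidate entity))).add
            (PySem.Str.len (pvSingularize (pvCandidate entity))))) (m0, S0) l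
      = (List.foldl (fun m entity => if pvCandidate entity = "" then m
            else m ++ [(pvCandidate entity, pvSingularize (pvCandidate entity))]) m0 l,
         List.foldl (fun S entity => if pvCandidate entity = "" then S
            else PySem.Set.add (PySem.Set.add S (PySem.Str.len (pvCandidate entity)))
              (PySem.Str.len (pvSingularize (pvCandidate entity)))) S0 l) := by
  induction l generalizing m0 S0 with
  | nil => rfl
  | cons hd tl ih =>
      rw [List.foldl_cons, List.foldl_cons, List.foldl_cons]
      by_cases h : pvCandidate hd = ""
      · rw [if_pos h, if_pos h, if_pos h, ih]
      · rw [if_neg h, if_neg h, if_neg h, ih]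


-- pointwise form of the matched-element condition
lemma pv_point (c s lw : String) (W : PySem.Set String) (hq : (c == "") = false)
    (hk1 : W.contains c = PySem.Str.isIn c lw) (hk2 : W.contains s = PySem.Str.isIn s lw) :
    (if (c == "" || !(PySem.Str.isIn c lw || PySem.Str.isIn s lw)) = true then none else some c)
    = (if (c == "") = true then none else some (c, s)).bind
        (fun a => if (W.contains a.1 || W.contains a.2) = true then some a.1 else none) := by
  simp only [hq, Bool.false_eq_true, if_false, Option.bind_some, Bool.false_or]
  rw [hk1, hk2]
  cases hxy : (PySem.Str.isIn c lw || PySem.Str.isIn s lw) <;> simp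

-- A's matched list equals B's matched list
set_option maxHeartbeats 2000000 in
lemma pv_matched_eq (lw : String) (entities : List String) :
    List.foldl (fun matched entity =>
        if pvCandidate entity = "" then matched
        else
          if (PySem.Str.isIn (pvCandidate entity) lw ||
              PySem.Str.isIn (pvSingularize (pvCandidate entity)) lw ||
              PySem.Str.isIn (if PySem.Str.endswith (pvCandidate entity) "s" = true
                then pvCandidate entity else pvCandidate entity ++ "s") lw) = true then
            matched ++ [pvCandidate entity]
          else matched) [] entities
    = List.filterMap (fun x =>
        if ((List.foldl (fun idx L => List.foldl (fun idx i =>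
                  idx.add (PySem.Str.slice lw (some i) (some (i + L)))) idx
                  (PySem.List.pyRange 0 (PySem.Str.len lw - L + 1))) PySem.Set.empty
              (List.foldl (fun st entity =>
                  if pvCandidate entity = "" then st
                  else (st.1 ++ [(pvCandidate entity, pvSingularize (pvCandidate entity))],
                    (st.2.add (PySem.Str.len (pvCandidate entity))).add
                      (PySem.Str.len (pvSingularize (pvCandidate entity)))))
                ([], PySem.Set.empty) entities).2).contains x.1 ||
            (List.foldl (fun idx L => List.foldl (fun idx i =>
                  idx.add (PySem.Str.slice lw (some i) (some (i + L)))) idx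
                  (PySem.List.pyRange 0 (PySem.Str.len lw - L + 1))) PySem.Set.empty
              (List.foldl (fun st entity =>
                  if pvCandidate entity = "" then st
                  else (st.1 ++ [(pvCandidate entity, pvSingularize (pvCandidate entity))],
                    (st.2.add (PySem.Str.len (pvCandidate entity))).add
                      (PySem.Str.len (pvSingularize (pvCandidate entity)))))
                ([], PySem.Set.empty) entities).2).contains x.2) = true then
          some x.1
        else none)
      (List.foldl (fun st entity =>
          if pvCandidate entity = "" then st
          else (st.1 ++ [(pvCandidate entity, pvSingularize (pvCandidate entity))],
            (st.2.add (PySem.Str.len (pvCandidate entity))).add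
              (PySem.Str.len (pvSingularize (pvCandidate entity)))))
        ([], PySem.Set.empty) entities).1 := by
  have hsplit := pv_pairfold entities [] PySem.Set.empty
  rw [hsplit]
  -- names for the two components and the window index
  set L2 := List.foldl (fun S entity => if pvCandidate entity = "" then S
      else PySem.Set.add (PySem.Set.add S (PySem.Str.len (pvCandidate entity)))
        (PySem.Str.len (pvSingularize (pvCandidate entity)))) PySem.Set.empty entities with hL2
  set W := List.foldl (fun idx L => List.foldl (fun idx i =>
        idx.add (PySem.Str.slice lw (some i) (some (i + L)))) idx
        (PySem.List.pyRange 0 (PySem.Str.len lw - L + 1))) PySem.Set.empty L2 with hW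
  -- membership facts for L2
  have hlenmem : ∀ x : Int, x ∈ L2 ↔ ∃ e ∈ entities, pvCandidate e ≠ "" ∧
      (x = PySem.Str.len (pvCandidate e) ∨ x = PySem.Str.len (pvSingularize (pvCandidate e))) := by
    intro x
    rw [hL2, pv_mem_lenfold_iff]
    have hne : (x ∈ (PySem.Set.empty : PySem.Set Int)) = False := by
      simp [PySem.Set.empty]
    rw [hne, false_or]
  have hnonneg : ∀ L ∈ L2, 0 ≤ L := by
    intro L hL
    rcases (hlenmem L).mp hL with ⟨e, _, _, h | h⟩ <;>
      rw [h, PySem.Str.len_eq] <;> positivity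
  -- membership in the window index
  have hWmem : ∀ y : String, y ∈ W ↔ ∃ L ∈ L2, ∃ i ∈ PySem.List.pyRange 0 (PySem.Str.len lw - L + 1),
      y = PySem.Str.slice lw (some i) (some (i + L)) := by
    intro y
    rw [hW, pv_mem_foldl_foldl_add_iff (fun L => PySem.List.pyRange 0 (PySem.Str.len lw - L + 1))
      (fun L i => PySem.Str.slice lw (some i) (some (i + L)))]
    have hne : (y ∈ (PySem.Set.empty : PySem.Set String)) = False := by
      simp [PySem.Set.empty]
    rw [hne, false_or]
  -- the window index answers exactly the substring question for indexed lengths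
  have hkey : ∀ x : String, PySem.Str.len x ∈ L2 → W.contains x = PySem.Str.isIn x lw := by
    intro x hx
    cases hIn : PySem.Str.isIn x lw with
    | true =>
        obtain ⟨i, hi0, hilt, hsl⟩ := pv_isIn_window lw x hIn
        have : x ∈ W := (hWmem x).mpr
          ⟨PySem.Str.len x, hx, i, PySem.List.mem_pyRange_one.mpr ⟨hi0, hilt⟩, hsl⟩
        exact (PySem.Set.contains_iff W x).mpr this
    | false =>
        cases hc : W.contains x with
        | false => rfl
        | true =>
            obtain ⟨L, hL, i, hiR, hsl⟩ := (hWmem x).mp ((PySem.Set.contains_iff W x).mp hc)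
            obtain ⟨hi0, -⟩ := PySem.List.mem_pyRange_one.mp hiR
            have hIn' := pv_slice_isIn lw i L hi0 (hnonneg L hL)
            rw [← hsl, hIn] at hIn'
            exact absurd hIn' Bool.false_ne_true
  clear_value W L2
  clear hW hL2
  -- rewrite A's fold into filterMap form
  have hAfun : (fun (matched : List String) entity =>
      if pvCandidate entity = "" then matched
      else
        if (PySem.Str.isIn (pvCandidate entity) lw ||
            PySem.Str.isIn (pvSingularize (pvCandidate entity)) lw ||
            PySem.Str.isIn (if PySem.Str.endswith (pvCandidate entity) "s" = true
              then pvCandidate entity else pvCandidate entity ++ "s") lw) = true then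
          matched ++ [pvCandidate entity]
        else matched)
      = (fun matched entity =>
        if (pvCandidate entity == "") ||
            !(PySem.Str.isIn (pvCandidate entity) lw ||
              PySem.Str.isIn (pvSingularize (pvCandidate entity)) lw) then matched
        else matched ++ [(fun e => pvCandidate e) entity]) := by
    funext m e
    by_cases h : pvCandidate e = ""
    · simp [h]
    · rw [if_neg h, pv_cond_plural (pvCandidate e) (pvSingularize (pvCandidate e)) lw]
      have hq : (pvCandidate e == "") = false := by simp [h]
      rw [hq, Bool.false_or]
      cases hxy : (PySem.Str.isIn (pvCandidate e) lw ||
          PySem.Str.isIn (pvSingularize (pvCandidate e)) lw) <;> simp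
  rw [hAfun, pv_foldl_if_append]
  -- rewrite B's candidate fold into filterMap form
  have hBfun : (fun (m : List (String × String)) entity =>
      if pvCandidate entity = "" then m
      else m ++ [(pvCandidate entity, pvSingularize (pvCandidate entity))])
      = (fun m entity => if (pvCandidate entity == "") then m
        else m ++ [(fun e => (pvCandidate e, pvSingularize (pvCandidate e))) entity]) := by
    funext m e
    by_cases h : pvCandidate e = "" <;> simp [h]
  rw [hBfun, pv_foldl_if_append]
  simp only [List.nil_append, List.filterMap_filterMap]
  apply List.filterMap_congr
  intro e he
  by_cases h : pvCandidate e = ""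
  · have hq : (pvCandidate e == "") = true := by simp [h]
    simp only [hq, Bool.true_or]
    rfl
  · have hq : (pvCandidate e == "") = false := by simp [h]
    have hc : PySem.Str.len (pvCandidate e) ∈ L2 :=
      (hlenmem _).mpr ⟨e, he, h, Or.inl rfl⟩
    have hs : PySem.Str.len (pvSingularize (pvCandidate e)) ∈ L2 :=
      (hlenmem _).mpr ⟨e, he, h, Or.inr rfl⟩
    exact pv_point (pvCandidate e) (pvSingularize (pvCandidate e)) lw W hq
      (hkey _ hc) (hkey _ hs)

-- ===== VERDICT (by name: the statement is the Claim_ definition above) =====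
theorem context_entities_for_chunk_py_spec : Claim_equal_context_entities_for_chunk_py := by
  intro text sc _
  unfold Spec_context_entities_for_chunk_py context_entities_for_chunk_py
    context_entities_for_chunk_py_alt
  cases sc with
  | none => rfl
  | some ctx =>
    cases hctx : ctx.isEmpty with
    | true => simp [hctx]
    | false =>
      simp only [hctx]
      cases hget : (PySem.Dict.mk ctx).get? "key_entities" with
      | none => simp only []
      | some entities =>
        simp only []
        rw [pv_matched_eq (PySem.Str.lower text) entities,
          pv_fallback_eq (List.take 2 entities)]
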